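-- pv_equiv track=rewrite | github.com/MSQFuersti/aoc2020 | sixth.py | extractAnswersPerGroup
-- ===== SOURCE A (Python) =====
-- def extractAnswersPerGroup(answers):
--     answersOfAllGroups = []
--     groupAnswers = []
--     for row in answers:
--         if row:
--             groupAnswers.extend(list(row[0]))
--             continue
--
--         answersOfAllGroups.append(groupAnswers)
--         groupAnswers = []
--
--     return answersOfAllGroups
-- ===== SOURCE B (Python) =====
-- def extractAnswersPerGroup(answers):
--     # Two-phase decomposition: repeatedly locate the next blank-row boundary
--     # with list.index and slice out the whole group at once, instead of A's
--     # single row-by-row pass with a running accumulator.  Rows after the last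
--     # blank row are never reached, so the trailing partial group is dropped
--     # exactly as in A.
--     groups = []
--     rest = answers
--     while [] in rest:
--         b = rest.index([])
--         groups.append([c for row in rest[:b] for c in row[0]])
--         rest = rest[b + 1:]
--     return groups
-- ===== Notes on version B (the rewrite author's own statement) =====
-- stated objective: alternative
-- what changed: Replaces A's single row-by-row pass with a running group accumulator by a boundary-driven loop: find each blank row with list.index, slice the whole group out at once, and continue on the remainder.
import Mathlib
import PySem

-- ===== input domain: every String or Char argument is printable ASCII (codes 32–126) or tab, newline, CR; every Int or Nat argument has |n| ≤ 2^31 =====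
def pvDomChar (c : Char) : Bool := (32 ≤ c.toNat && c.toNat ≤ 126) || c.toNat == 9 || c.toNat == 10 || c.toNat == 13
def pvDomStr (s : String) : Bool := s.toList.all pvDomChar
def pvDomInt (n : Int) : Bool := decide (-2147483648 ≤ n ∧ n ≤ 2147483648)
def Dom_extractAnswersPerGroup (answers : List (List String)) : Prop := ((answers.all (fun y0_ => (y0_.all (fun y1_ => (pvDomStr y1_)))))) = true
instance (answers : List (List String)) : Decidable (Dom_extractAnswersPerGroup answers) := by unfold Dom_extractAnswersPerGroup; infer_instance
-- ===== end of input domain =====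

-- B replaces A's single accumulator pass by a boundary-driven loop (list.index + slices); objective: alternative structure, same cost.

-- list(row[0]) for a NONEMPTY row: the first string as a list of one-character strings
def pvChars (row : List String) : List String :=
  (row.headD "").toList.map (fun c => String.ofList [c])

-- ===== PORT A =====
def extractAnswersPerGroup (answers : List (List String)) : List (List String) :=
  (answers.foldl
    (fun (st : List (List String) × List String) row =>
      if row ≠ [] then (st.1, st.2 ++ pvChars row)   -- groupAnswers.extend(list(row[0])); row nonempty here
      else (st.1 ++ [st.2], []))
    ([], [])).1

-- ===== PORT B =====
-- the while loop of Source B: state (groups, rest); rest.index([]) = PySem.List.index?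
def extractAnswersPerGroupGo (groups : List (List String)) (rest : List (List String)) : List (List String) :=
  match h : PySem.List.index? rest ([] : List String) with
  | none => groups
  | some b =>
      -- rows of rest[:b] are nonempty (b is the FIRST index of []), so row[0] = headD
      extractAnswersPerGroupGo
        (groups ++ [(PySem.List.slice rest none (some (b : Int))).flatMap pvChars])
        (PySem.List.slice rest (some ((b : Int) + 1)) none)
termination_by rest.length
decreasing_by
  have hb := PySem.List.getElem_of_index?_eq_some h
  obtain ⟨hk, -, -⟩ := hb
  have : ((b : Int) + 1) = ((b + 1 : Nat) : Int) := by push_cast; ring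
  rw [this, PySem.List.slice_from_natCast]
  simp [List.length_drop]
  omega

def extractAnswersPerGroup_alt (answers : List (List String)) : List (List String) :=
  extractAnswersPerGroupGo [] answers

-- ===== PRECONDITION & SPEC =====
def Spec_extractAnswersPerGroup (answers : List (List String)) (out : List (List String)) : Prop := out = extractAnswersPerGroup_alt answers
instance (answers : List (List String)) (out : List (List String)) : Decidable (Spec_extractAnswersPerGroup answers out) := by unfold Spec_extractAnswersPerGroup; infer_instance

-- ===== CLAIM (what is proved, stated in full; the proofs are below) =====
def Claim_equal_extractAnswersPerGroup : Prop := ∀ (answers : List (List String)), Dom_extractAnswersPerGroup answers → Spec_extractAnswersPerGroup answers (extractAnswersPerGroup answers)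

-- ===== LEMMAS AND PROOFS =====

-- canonical recursive form: groups of the list given a pending accumulator g
def pvF : List (List String) → List String → List (List String)
  | [], _ => []
  | row :: rest, g => if row = [] then g :: pvF rest [] else pvF rest (g ++ pvChars row)

theorem pvA_foldl (l : List (List String)) :
    ∀ (done : List (List String)) (g : List String),
      (l.foldl (fun (st : List (List String) × List String) row =>
          if row ≠ [] then (st.1, st.2 ++ pvChars row) else (st.1 ++ [st.2], [])) (done, g)).1
        = done ++ pvF l g := by
  induction l with
  | nil => intro done g; simp [pvF]
  | cons row rest ih =>
      intro done g
      rw [List.foldl_cons]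
      by_cases hr : row = []
      · rw [if_neg (by simp [hr]), ih]; simp [pvF, hr]
      · rw [if_pos hr, ih]; simp [pvF, hr]

theorem pvF_no_empty (l : List (List String)) (h : ([] : List String) ∉ l) (g : List String) :
    pvF l g = [] := by
  induction l generalizing g with
  | nil => rfl
  | cons row rest ih =>
      have hr : row ≠ [] := by intro e; exact h (by simp [e])
      simp [pvF, hr]
      exact ih (by intro m; exact h (List.mem_cons_of_mem _ m)) _

theorem pvF_split (pre suf : List (List String)) (hpre : ([] : List String) ∉ pre) :
    ∀ g, pvF (pre ++ [] :: suf) g = (g ++ pre.flatMap pvChars) :: pvF suf [] := by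
  induction pre with
  | nil => intro g; simp [pvF]
  | cons row rest ih =>
      intro g
      have hr : row ≠ [] := by intro e; exact hpre (by simp [e])
      simp only [List.cons_append, pvF, if_neg hr]
      rw [ih (by intro m; exact hpre (List.mem_cons_of_mem _ m))]
      simp

theorem pvGo_eq (n : Nat) : ∀ (rest : List (List String)), rest.length ≤ n →
    ∀ (groups : List (List String)),
      extractAnswersPerGroupGo groups rest = groups ++ pvF rest [] := by
  induction n with
  | zero =>
      intro rest hlen groups
      have : rest = [] := by cases rest <;> simp_all
      subst this
      rw [extractAnswersPerGroupGo]
      simp [PySem.List.index?_eq_idxOf?, pvF]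
  | succ n ih =>
      intro rest hlen groups
      rw [extractAnswersPerGroupGo]
      split
      next h =>
          have hmem := (PySem.List.index?_eq_none_iff _ _).1 h
          simp [pvF_no_empty rest hmem]
      next b h =>
          obtain ⟨pre, suf, hsplit, hlenpre, hnm⟩ := (PySem.List.index?_eq_some_iff _ _ _).1 h
          have hslice1 : PySem.List.slice rest none (some (b : Int)) = pre := by
            rw [PySem.List.slice_to_natCast, hsplit, ← hlenpre]
            simp
          have hcast : ((b : Int) + 1) = ((b + 1 : Nat) : Int) := by push_cast; ring
          have hslice2 : PySem.List.slice rest (some ((b : Int) + 1)) none = suf := by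
            rw [hcast, PySem.List.slice_from_natCast, hsplit, ← hlenpre]
            simp [List.drop_append]
          rw [hslice1, hslice2]
          have hsuf : suf.length ≤ n := by
            have := congrArg List.length hsplit
            simp at this
            omega
          rw [ih suf hsuf]
          rw [hsplit, pvF_split pre suf hnm []]
          simp

-- ===== VERDICT (by name: the statement is the Claim_ definition above) =====
theorem extractAnswersPerGroup_spec : Claim_equal_extractAnswersPerGroup := by
  intro answers _
  unfold Spec_extractAnswersPerGroup extractAnswersPerGroup extractAnswersPerGroup_alt
  rw [pvA_foldl, pvGo_eq answers.length answers le_rfl]
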